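-- pv_equiv track=rewrite | github.com/develdeco/code-challenges | pow_pairs_fast.py | solution
-- ===== SOURCE A (Python) =====
-- def isPowTwo(n):
--     return n != 0 and (n & (n-1) == 0)
--
-- def solution(a):
--     n = len(a)
--     pairs = 0
--     for i in range(n):
--         for j in range(i,n):
--             if isPowTwo(a[i]+a[j]):
--                 pairs += 1
--     return pairs
-- ===== SOURCE B (Python) =====
-- def solution(a):
--     cnt = {}
--     for v in a:
--         cnt[v] = cnt.get(v, 0) + 1
--     m = max(a, default=0)
--     powers = []
--     p = 1
--     while p <= 2 * m:
--         powers.append(p)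
--         p *= 2
--     ordered = 0
--     diag = 0
--     for v in a:
--         for p in powers:
--             ordered += cnt.get(p - v, 0)
--         if v + v in powers:
--             diag += 1
--     return (ordered + diag) // 2
-- ===== Notes on version B (the rewrite author's own statement) =====
-- stated objective: faster
-- what changed: Replaces A's O(n^2) all-pairs scan by a frequency dictionary and the at most 33 candidate powers of two up to 2*max(a): ordered complement counts plus the diagonal, halved.
import Mathlib
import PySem

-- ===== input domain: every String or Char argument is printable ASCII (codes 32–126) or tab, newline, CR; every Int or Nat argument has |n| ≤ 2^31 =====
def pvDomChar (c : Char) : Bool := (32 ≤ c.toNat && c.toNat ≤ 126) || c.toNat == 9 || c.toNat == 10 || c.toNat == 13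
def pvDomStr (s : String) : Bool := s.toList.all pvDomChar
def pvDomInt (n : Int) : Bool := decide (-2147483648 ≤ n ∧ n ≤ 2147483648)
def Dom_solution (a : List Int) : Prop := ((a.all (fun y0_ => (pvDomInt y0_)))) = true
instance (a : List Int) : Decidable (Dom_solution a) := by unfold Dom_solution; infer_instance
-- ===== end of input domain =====

-- B replaces A's O(n^2) double loop by a frequency map plus the ≤ 33 relevant powers of two (objective: faster).

-- ===== PORT A =====
def isPowTwo (n : Int) : Bool := n != 0 && (PySem.Int.band n (n - 1) == 0)

def solution (a : List Int) : Int :=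
  let n : Int := PySem.List.len a
  (PySem.List.pyRange 0 n 1).foldl (fun pairs i =>
    (PySem.List.pyRange i n 1).foldl (fun pairs j =>
      if isPowTwo (PySem.List.pyGetD a i 0 + PySem.List.pyGetD a j 0) then pairs + 1 else pairs)
      pairs) 0

-- ===== PORT B =====
-- 'p = 1; while p <= 2*m: powers.append(p); p *= 2'  (the '1 ≤ p' part of the guard is a
-- totality guard only: p starts at 1 and only doubles, so it always holds)
def buildPowers (m p : Int) : List Int :=
  if h : 1 ≤ p ∧ p ≤ 2 * m then p :: buildPowers m (2 * p) else []
termination_by (2 * m + 1 - p).toNat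
decreasing_by omega

def solution_alt (a : List Int) : Int :=
  let cnt := a.foldl (fun d v => d.insert v (d.getD v 0 + 1)) PySem.Dict.empty
  let m := PySem.List.maxD a (fun x => x) 0
  let powers := buildPowers m 1
  let od := a.foldl (fun s v =>
      (powers.foldl (fun o p => o + cnt.getD (p - v) 0) s.1,
       if powers.contains (v + v) then s.2 + 1 else s.2)) (0, 0)
  PySem.Int.floordiv (od.1 + od.2) 2

-- ===== PRECONDITION & SPEC =====
def Spec_solution (a : List Int) (out : Int) : Prop := out = solution_alt a
instance (a : List Int) (out : Int) : Decidable (Spec_solution a out) := by unfold Spec_solution; infer_instance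

-- ===== CLAIM (what is proved, stated in full; the proofs are below) =====
def Claim_equal_solution : Prop := ∀ (a : List Int), Dom_solution a → Spec_solution a (solution a)

-- ===== LEMMAS AND PROOFS =====

-- A's count written structurally: for each head x, count the partners in x :: t (j ≥ i).
def gA : List Int → Int
  | [] => 0
  | x :: t => (List.countP (fun y => isPowTwo (x + y)) (x :: t) : Int) + gA t

-- the bit trick: n & (n-1) == 0 on a positive Nat characterises the powers of two
lemma nat_pow2 (n : Nat) (h : 0 < n) : n &&& (n - 1) = 0 ↔ ∃ k, n = 2 ^ k := by
  constructor
  · intro hz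
    by_contra hne
    push Not at hne
    set k := n.log2 with hk
    have h1 : 2 ^ k ≤ n := Nat.log2_self_le h.ne'
    have h2 : n < 2 ^ (k + 1) := Nat.lt_log2_self
    have hlt : 2 ^ k < n := lt_of_le_of_ne h1 (fun e => hne k e.symm)
    have hp : (2 : Nat) ^ (k + 1) = 2 ^ k * 2 := by ring
    have d1 : n / 2 ^ k = 1 := Nat.div_eq_of_lt_le (by omega) (by omega)
    have d2 : (n - 1) / 2 ^ k = 1 := Nat.div_eq_of_lt_le (by omega) (by omega)
    have t1 : n.testBit k = true := by
      rw [Nat.testBit_eq_decide_div_mod_eq, d1]; decide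
    have t2 : (n - 1).testBit k = true := by
      rw [Nat.testBit_eq_decide_div_mod_eq, d2]; decide
    have : (n &&& (n - 1)).testBit k = true := by rw [Nat.testBit_and, t1, t2]; rfl
    rw [hz, Nat.zero_testBit] at this; exact absurd this (by decide)
  · rintro ⟨k, rfl⟩
    apply Nat.eq_of_testBit_eq
    intro i
    rw [Nat.testBit_and, Nat.testBit_two_pow, Nat.testBit_two_pow_sub_one, Nat.zero_testBit]
    by_cases hik : i < k <;> by_cases hek : k = i <;> simp [hik, hek]

lemma isPowTwo_iff (q : Int) : isPowTwo q = true ↔ ∃ k : Nat, q = 2 ^ k := by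
  unfold isPowTwo
  rcases lt_trichotomy q 0 with hq | hq | hq
  · have hb : PySem.Int.band q (q - 1) = -↑((-q - 1).toNat ||| (-(q - 1) - 1).toNat) - 1 := by
      unfold PySem.Int.band
      rw [if_neg (by omega), if_neg (by omega)]
    rw [hb]
    simp only [Bool.and_eq_true, bne_iff_ne, ne_eq, beq_iff_eq]
    constructor
    · rintro ⟨-, hz⟩; exfalso; omega
    · rintro ⟨k, rfl⟩; exfalso
      have : (0 : Int) < 2 ^ k := by positivity
      omega
  · subst hq
    constructor
    · intro hc; simp at hc
    · rintro ⟨k, hk⟩; exfalso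
      have : (0 : Int) < 2 ^ k := by positivity
      omega
  · lift q to ℕ using hq.le with n
    have hn : 0 < n := by exact_mod_cast hq
    have h2 : (n : Int) - 1 = ((n - 1 : Nat) : Int) := by omega
    rw [h2, PySem.Int.band_natCast]
    simp only [Bool.and_eq_true, bne_iff_ne, ne_eq, Nat.cast_eq_zero, beq_iff_eq]
    constructor
    · rintro ⟨-, hz⟩
      obtain ⟨k, hk⟩ := (nat_pow2 n hn).1 hz
      exact ⟨k, by exact_mod_cast congrArg (Nat.cast : Nat → Int) hk⟩
    · rintro ⟨k, hk⟩
      have hk' : n = 2 ^ k := by exact_mod_cast hk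
      exact ⟨by omega, (nat_pow2 n hn).2 ⟨k, hk'⟩⟩

lemma mem_buildPowers (m : Int) : ∀ (n : ℕ) (p : Int), (2 * m + 1 - p).toNat = n → 1 ≤ p →
    ∀ q, (q ∈ buildPowers m p ↔ ∃ k : ℕ, q = p * 2 ^ k ∧ q ≤ 2 * m) := by
  intro n
  induction n using Nat.strong_induction_on with
  | _ n ih =>
    intro p hn hp q
    rw [buildPowers]
    by_cases hle : p ≤ 2 * m
    · rw [dif_pos ⟨hp, hle⟩]
      simp only [List.mem_cons]
      rw [ih ((2 * m + 1 - 2 * p).toNat) (by omega) (2 * p) rfl (by omega) q]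
      constructor
      · rintro (rfl | ⟨k, rfl, hk⟩)
        · exact ⟨0, by ring, hle⟩
        · exact ⟨k + 1, by ring, hk⟩
      · rintro ⟨k, rfl, hk⟩
        cases k with
        | zero => left; ring
        | succ k => right; exact ⟨k, by ring, hk⟩
    · rw [dif_neg (fun hh => hle hh.2)]
      simp only [List.not_mem_nil, false_iff]
      rintro ⟨k, rfl, hk⟩
      have h2 : (1 : Int) ≤ 2 ^ k := one_le_pow₀ (by norm_num)
      have h3 : p ≤ p * 2 ^ k := le_mul_of_one_le_right (by omega) h2
      omega

lemma nodup_buildPowers (m : Int) : ∀ (n : ℕ) (p : Int), (2 * m + 1 - p).toNat = n → 1 ≤ p →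
    (buildPowers m p).Nodup := by
  intro n
  induction n using Nat.strong_induction_on with
  | _ n ih =>
    intro p hn hp
    rw [buildPowers]
    by_cases hle : p ≤ 2 * m
    · rw [dif_pos ⟨hp, hle⟩]
      refine List.nodup_cons.2 ⟨?_, ih ((2 * m + 1 - 2 * p).toNat) (by omega) (2 * p) rfl (by omega)⟩
      intro hmem
      obtain ⟨k, hk, -⟩ := (mem_buildPowers m _ (2 * p) rfl (by omega) p).1 hmem
      have h2 : (1 : Int) ≤ 2 ^ k := one_le_pow₀ (by norm_num)
      have h3 : 2 * p ≤ 2 * p * 2 ^ k := le_mul_of_one_le_right (by omega) h2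
      omega
    · rw [dif_neg (fun hh => hle hh.2)]
      exact List.nodup_nil

lemma mem_powers_iff (m z : Int) (hz : z ≤ 2 * m) : z ∈ buildPowers m 1 ↔ isPowTwo z = true := by
  rw [mem_buildPowers m _ 1 rfl le_rfl z, isPowTwo_iff]
  constructor
  · rintro ⟨k, hk, -⟩; exact ⟨k, by omega⟩
  · rintro ⟨k, hk⟩; exact ⟨k, by omega, hz⟩

lemma countP_or_disjoint (t : List Int) (p q : Int → Bool) (h : ∀ y, ¬(p y = true ∧ q y = true)) :
    t.countP (fun y => p y || q y) = t.countP p + t.countP q := by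
  induction t with
  | nil => simp
  | cons a l ih =>
    by_cases hp : p a = true <;> by_cases hq : q a = true
    · exact absurd ⟨hp, hq⟩ (h a)
    all_goals simp [hp, hq, ih] <;> omega

-- summing a value's count over the distinct powers is counting partners whose sum is a listed power
lemma sum_count_eq_countP_mem (x : Int) (t : List Int) :
    ∀ (P : List Int), P.Nodup →
      ((P.map (fun p => (t.count (p - x) : Int))).sum = (t.countP (fun y => decide ((x + y) ∈ P)) : Int)) := by
  intro P
  induction P with
  | nil => simp
  | cons p P' ih =>
    intro hnd
    obtain ⟨hp, hnd'⟩ := List.nodup_cons.1 hnd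
    have hcong : (t.countP fun y => decide (x + y ∈ p :: P')) =
        t.countP (fun y => decide (x + y = p) || decide ((x + y) ∈ P')) := by
      apply List.countP_congr
      intro y _
      simp [List.mem_cons]
    rw [hcong, countP_or_disjoint t _ _ (by
      intro y hy
      simp only [decide_eq_true_eq] at hy
      exact hp (hy.1 ▸ hy.2))]
    have hcnt : t.count (p - x) = t.countP (fun y => decide (x + y = p)) := by
      rw [List.count_eq_countP]
      apply List.countP_congr
      intro y _
      constructor
      · intro h0; simp only [beq_iff_eq] at h0; simp only [decide_eq_true_eq]; omega
      · intro h0; simp only [decide_eq_true_eq] at h0; simp only [beq_iff_eq]; omega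
    simp only [List.map_cons, List.sum_cons, ih hnd', hcnt]
    push_cast
    ring

-- the halving identity: ordered pairs + diagonal = twice A's i ≤ j count
lemma two_mul_gA (a : List Int) :
    (a.map (fun x => (a.countP (fun y => isPowTwo (x + y)) : Int))).sum
      + (a.countP (fun x => isPowTwo (x + x)) : Int) = 2 * gA a := by
  induction a with
  | nil => simp [gA]
  | cons x t ih =>
    have hmap : (t.map (fun z => ((x :: t).countP (fun y => isPowTwo (z + y)) : Int))).sum
        = (t.map (fun z => (t.countP (fun y => isPowTwo (z + y)) : Int))).sum
          + (t.countP (fun z => isPowTwo (x + z)) : Int) := by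
      have h1 : (t.map (fun z => ((x :: t).countP (fun y => isPowTwo (z + y)) : Int)))
          = t.map (fun z => (t.countP (fun y => isPowTwo (z + y)) : Int)
              + (if isPowTwo (z + x) then (1 : Int) else 0)) := by
        apply List.map_congr_left
        intro z _
        rw [List.countP_cons]
        split_ifs with h0 <;> simp
      rw [h1, PySem.List.sum_map_add_int, PySem.List.sum_map_ite_one_zero]
      congr 2
      apply List.countP_congr
      intro z _
      rw [add_comm z x]
    rw [List.map_cons, List.sum_cons, hmap]
    simp only [gA, List.countP_cons]
    split_ifs with h0 <;> push_cast <;> omega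

-- ===== A's port equals gA =====
lemma sum_range_countP (a : List Int) :
    ((List.range a.length).map
      (fun k => ((a.drop k).countP (fun y => isPowTwo (a.getD k 0 + y)) : Int))).sum = gA a := by
  induction a with
  | nil => simp [gA]
  | cons x t ih =>
    rw [List.length_cons, List.range_succ_eq_map, List.map_cons, List.map_map]
    have h1 : (List.map ((fun k => (((x :: t).drop k).countP (fun y => isPowTwo ((x :: t).getD k 0 + y)) : Int)) ∘ Nat.succ) (List.range t.length))
        = List.map (fun k => ((t.drop k).countP (fun y => isPowTwo (t.getD k 0 + y)) : Int)) (List.range t.length) := by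
      apply List.map_congr_left
      intro k _
      simp [Function.comp]
    rw [List.sum_cons, h1, ih]
    simp [gA]

lemma sol_eq_gA (a : List Int) : solution a = gA a := by
  show (PySem.List.pyRange 0 (PySem.List.len a) 1).foldl (fun pairs i =>
    (PySem.List.pyRange i (PySem.List.len a) 1).foldl (fun pairs j =>
      if isPowTwo (PySem.List.pyGetD a i 0 + PySem.List.pyGetD a j 0) then pairs + 1 else pairs)
      pairs) 0 = gA a
  have hcong : ∀ (pairs i : Int), i ∈ PySem.List.pyRange 0 (PySem.List.len a) 1 →
      ((PySem.List.pyRange i (PySem.List.len a) 1).foldl (fun pairs j =>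
        if isPowTwo (PySem.List.pyGetD a i 0 + PySem.List.pyGetD a j 0) then pairs + 1 else pairs) pairs)
      = pairs + ((a.drop i.toNat).countP (fun y => isPowTwo (PySem.List.pyGetD a i 0 + y)) : Int) := by
    intro pairs i hi
    rw [PySem.List.mem_pyRange_one] at hi
    rw [PySem.List.foldl_pyRange_pyGetD a 0
      (fun pairs y => if isPowTwo (PySem.List.pyGetD a i 0 + y) then pairs + 1 else pairs) pairs hi.1,
      PySem.List.foldl_if_add_one]
  rw [PySem.List.foldl_congr_mem _ _ _ _ hcong, PySem.List.foldl_add _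
    (fun i => ((a.drop i.toNat).countP (fun y => isPowTwo (PySem.List.pyGetD a i 0 + y)) : Int)) 0]
  have hmg : (PySem.List.pyRange 0 (PySem.List.len a) 1).map
      (fun i => ((a.drop i.toNat).countP (fun y => isPowTwo (PySem.List.pyGetD a i 0 + y)) : Int))
      = (List.range a.length).map
        (fun k => ((a.drop k).countP (fun y => isPowTwo (a.getD k 0 + y)) : Int)) := by
    rw [PySem.List.pyRange_one, List.map_map]
    simp only [PySem.List.len_eq, Int.sub_zero, Int.toNat_natCast]
    apply List.map_congr_left
    intro k hk
    simp [PySem.List.pyGetD_natCast]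
  rw [hmg, sum_range_countP a]
  omega

-- ===== B's port equals gA =====
lemma alt_eq_gA (a : List Int) : solution_alt a = gA a := by
  show PySem.Int.floordiv
    ((a.foldl (fun s v =>
      ((buildPowers (PySem.List.maxD a (fun x => x) 0) 1).foldl
        (fun o p => o + (a.foldl (fun d v => d.insert v (d.getD v 0 + 1)) PySem.Dict.empty).getD (p - v) 0) s.1,
       if (buildPowers (PySem.List.maxD a (fun x => x) 0) 1).contains (v + v) then s.2 + 1 else s.2))
      ((0 : Int), (0 : Int))).1 +
     (a.foldl (fun s v =>
      ((buildPowers (PySem.List.maxD a (fun x => x) 0) 1).foldl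
        (fun o p => o + (a.foldl (fun d v => d.insert v (d.getD v 0 + 1)) PySem.Dict.empty).getD (p - v) 0) s.1,
       if (buildPowers (PySem.List.maxD a (fun x => x) 0) 1).contains (v + v) then s.2 + 1 else s.2))
      ((0 : Int), (0 : Int))).2) 2 = gA a
  set m := PySem.List.maxD a (fun x => x) 0 with hm
  set C : PySem.Dict Int Int := a.foldl (fun d v => d.insert v (d.getD v 0 + 1)) PySem.Dict.empty with hC
  set P := buildPowers m 1 with hP
  have hbound : ∀ y ∈ a, y ≤ m := fun y hy => PySem.List.le_maxD_id a 0 y hy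
  have hnd : P.Nodup := by rw [hP]; exact nodup_buildPowers m _ 1 rfl le_rfl
  have hcnt : ∀ w, C.getD w 0 = (a.count w : Int) := by
    intro w
    rw [hC, PySem.Dict.foldl_insert_getD_add_one_eq_counter, PySem.Dict.getD_counter]
  have hmemP : ∀ z, z ≤ 2 * m → (z ∈ P ↔ isPowTwo z = true) := by
    intro z hz; rw [hP]; exact mem_powers_iff m z hz
  rw [PySem.List.foldl_prod_mk (f := fun o v => P.foldl (fun o p => o + C.getD (p - v) 0) o)
      (g := fun d v => if P.contains (v + v) then d + 1 else d)]
  have hfst : a.foldl (fun o v => P.foldl (fun o p => o + C.getD (p - v) 0) o) 0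
      = (a.map (fun x => (a.countP (fun y => isPowTwo (x + y)) : Int))).sum := by
    have hstep : ∀ (o : Int), ∀ v ∈ a, P.foldl (fun o p => o + C.getD (p - v) 0) o
        = o + (a.countP (fun y => isPowTwo (v + y)) : Int) := by
      intro o v hv
      rw [PySem.List.foldl_add P (fun p => C.getD (p - v) 0) o]
      congr 1
      have h1 : P.map (fun p => C.getD (p - v) 0) = P.map (fun p => (a.count (p - v) : Int)) := by
        apply List.map_congr_left
        intro p _
        exact hcnt (p - v)
      rw [h1, sum_count_eq_countP_mem v a P hnd]
      congr 1
      apply List.countP_congr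
      intro y hy
      have h2 : v + y ≤ 2 * m := by
        have := hbound v hv; have := hbound y hy; omega
      simp only [decide_eq_true_eq]
      rw [← hmemP (v + y) h2]
    rw [PySem.List.foldl_congr_mem _ _ _ _ hstep,
      PySem.List.foldl_add a (fun v => (a.countP (fun y => isPowTwo (v + y)) : Int)) 0]
    omega
  have hsnd : a.foldl (fun d v => if P.contains (v + v) then d + 1 else d) 0
      = (a.countP (fun x => isPowTwo (x + x)) : Int) := by
    have hcong : ∀ (d : Int), ∀ v ∈ a,
        (if P.contains (v + v) then d + 1 else d) = (if isPowTwo (v + v) then d + 1 else d) := by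
      intro d v hv
      have h1 : v + v ≤ 2 * m := by have := hbound v hv; omega
      have h2 : P.contains (v + v) = isPowTwo (v + v) := by
        by_cases hmem : (v + v) ∈ P
        · rw [(hmemP (v + v) h1).1 hmem]
          simp [hmem]
        · have h3 : isPowTwo (v + v) = false := by
            rw [← Bool.not_eq_true]
            intro hc
            exact hmem ((hmemP (v + v) h1).2 hc)
          rw [h3]
          simp [hmem]
      rw [h2]
    rw [PySem.List.foldl_congr_mem _ _ _ _ hcong, PySem.List.foldl_if_add_one]
    omega
  dsimp only
  rw [hfst, hsnd, two_mul_gA a,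
    PySem.Int.floordiv_eq_ediv_of_pos (by norm_num : (0:Int) < 2)]
  exact Int.mul_ediv_cancel_left _ (by norm_num)

-- ===== VERDICT (by name: the statement is the Claim_ definition above) =====
theorem solution_spec : Claim_equal_solution := by
  intro a _
  unfold Spec_solution
  rw [sol_eq_gA a, alt_eq_gA a]
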